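-- pv_equiv track=rewrite | github.com/IAVI-DEV/tpixel | src/tpixel/hiv.py | _sort_animal_groups
-- ===== SOURCE A (Python) =====
-- def _sort_animal_groups(animal_names: list[str], lineage: str) -> list[str]:
--     """Sort: lineage self first, recombinants, then alphabetical.
--
--     Args:
--         animal_names: Unique animal/group names to sort.
--         lineage: The lineage name to place first.
--
--     Returns:
--         Sorted list: lineage first, then recombinants, then others alphabetically.
--
--     Examples:
--         >>> _sort_animal_groups(["B", "rec1", "A", "lin1"], "lin1")
--         ['lin1', 'rec1', 'A', 'B']
--         >>> _sort_animal_groups(["X", "Y"], "Z")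
--         ['X', 'Y']
--     """
--     self_group = []
--     rec_group = []
--     other_group = []
--     for name in animal_names:
--         if name == lineage:
--             self_group.append(name)
--         elif name.lower().startswith("rec"):
--             rec_group.append(name)
--         else:
--             other_group.append(name)
--     return self_group + sorted(rec_group) + sorted(other_group)
-- ===== SOURCE B (Python) =====
-- def _sort_animal_groups(animal_names: list[str], lineage: str) -> list[str]:
--     def rank(name: str) -> int:
--         if name == lineage:
--             return 0
--         if name.lower().startswith("rec"):
--             return 1
--         return 2
--     return sorted(animal_names, key=lambda n: (rank(n), n))
-- ===== Notes on version B (the rewrite author's own statement) =====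
-- stated objective: idiomatic
-- what changed: Replaces the three-bucket partition followed by two separate sorts with one stable sorted() call keyed by the tuple (rank, name), where rank is 0 for the lineage, 1 for recombinants, 2 otherwise.
import Mathlib
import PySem

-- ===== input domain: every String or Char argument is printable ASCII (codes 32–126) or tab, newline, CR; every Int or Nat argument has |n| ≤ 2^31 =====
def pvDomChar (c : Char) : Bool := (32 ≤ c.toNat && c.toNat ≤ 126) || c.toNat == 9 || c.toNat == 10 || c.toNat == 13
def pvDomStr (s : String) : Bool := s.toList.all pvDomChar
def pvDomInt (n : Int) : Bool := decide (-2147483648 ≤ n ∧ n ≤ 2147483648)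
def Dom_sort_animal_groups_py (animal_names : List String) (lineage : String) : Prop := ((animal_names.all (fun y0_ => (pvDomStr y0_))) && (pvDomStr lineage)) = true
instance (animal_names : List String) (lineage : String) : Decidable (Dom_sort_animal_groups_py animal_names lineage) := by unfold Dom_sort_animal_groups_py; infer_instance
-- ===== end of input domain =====

-- B replaces A's three-bucket partition followed by two separate sorts with one stable keyed sort (idiomatic; same cost).

-- ===== PORT A =====
-- A: partition into self/rec/other buckets in one loop, then self ++ sorted(rec) ++ sorted(other).
def sort_animal_groups_py (animal_names : List String) (lineage : String) : List String :=
  let st := animal_names.foldl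
    (fun (st : List String × List String × List String) name =>
      if name == lineage then (st.1 ++ [name], st.2.1, st.2.2)
      else if PySem.Str.startswith (PySem.Str.lower name) "rec" then (st.1, st.2.1 ++ [name], st.2.2)
      else (st.1, st.2.1, st.2.2 ++ [name]))
    ([], [], [])
  st.1 ++ PySem.List.sorted st.2.1 (fun x => x) false ++ PySem.List.sorted st.2.2 (fun x => x) false

-- ===== PORT B =====
-- B: one stable sort keyed by the tuple (rank name, name).
def pvRank (lineage name : String) : Int :=
  if name == lineage then 0
  else if PySem.Str.startswith (PySem.Str.lower name) "rec" then 1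
  else 2

def sort_animal_groups_py_alt (animal_names : List String) (lineage : String) : List String :=
  PySem.List.sorted2 animal_names (pvRank lineage) (fun n => n) false

-- ===== PRECONDITION & SPEC =====
def Spec_sort_animal_groups_py (animal_names : List String) (lineage : String) (out : List String) : Prop := out = sort_animal_groups_py_alt animal_names lineage
instance (animal_names : List String) (lineage : String) (out : List String) : Decidable (Spec_sort_animal_groups_py animal_names lineage out) := by unfold Spec_sort_animal_groups_py; infer_instance

-- ===== CLAIM (what is proved, stated in full; the proofs are below) =====
def Claim_equal_sort_animal_groups_py : Prop := ∀ (animal_names : List String) (lineage : String), Dom_sort_animal_groups_py animal_names lineage → Spec_sort_animal_groups_py animal_names lineage (sort_animal_groups_py animal_names lineage)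

-- ===== LEMMAS AND PROOFS =====

-- The comparison sorted2 uses, specialised to key (pvRank lineage ·, ·).
def pvBefore (lineage a b : String) : Bool :=
  decide (pvRank lineage a < pvRank lineage b) ||
    (!decide (pvRank lineage b < pvRank lineage a) && decide (a.toList < b.toList))

-- "a comes no later than b": the negation of pvBefore b a; both results are Pairwise in it.
def pvLe (lineage a b : String) : Prop := pvBefore lineage b a = false

theorem pvLe_iff {l a b : String} :
    pvLe l a b ↔ pvRank l a ≤ pvRank l b ∧ (pvRank l b ≤ pvRank l a → a.toList ≤ b.toList) := by
  simp [pvLe, pvBefore]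

theorem pvBefore_asymm {l a b : String} (h : pvBefore l a b = true) : pvLe l a b := by
  rw [pvLe_iff]
  simp [pvBefore] at h
  rcases h with h | ⟨h1, h2⟩
  · exact ⟨le_of_lt h, fun hc => absurd h (by omega)⟩
  · exact ⟨h1, fun _ => le_of_lt h2⟩

theorem pvLe_of_not_before {l a b : String} (h : ¬ pvBefore l b a = true) : pvLe l a b :=
  (Bool.not_eq_true _).mp h

theorem pvLe_antisymm {l a b : String} (h1 : pvLe l a b) (h2 : pvLe l b a) : a = b := by
  rw [pvLe_iff] at h1 h2
  exact String.toList_inj.mp (le_antisymm (h1.2 h2.1) (h2.2 h1.1))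

theorem pvLe_trans {l a b c : String} (h1 : pvLe l a b) (h2 : pvLe l b c) : pvLe l a c := by
  rw [pvLe_iff] at h1 h2 ⊢
  refine ⟨le_trans h1.1 h2.1, fun hc => ?_⟩
  exact le_trans (h1.2 (le_trans h2.1 hc)) (h2.2 (le_trans hc h1.1))

theorem pvLe_of_rank_lt {l a b : String} (h : pvRank l a < pvRank l b) : pvLe l a b := by
  rw [pvLe_iff]; exact ⟨le_of_lt h, fun hc => absurd h (by omega)⟩

theorem pvLe_of_rank_eq_le {l a b : String} (hr : pvRank l a = pvRank l b) (hs : a ≤ b) :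
    pvLe l a b := by
  rw [pvLe_iff]
  exact ⟨le_of_eq hr, fun _ => (String.le_iff_toList_le).mp hs⟩

theorem insertBy_pairwise {l : String} {x : String} :
    ∀ {acc : List String}, acc.Pairwise (pvLe l) →
      (PySem.List.insertBy (pvBefore l) x acc).Pairwise (pvLe l) := by
  intro acc
  induction acc with
  | nil => intro _; simp [PySem.List.insertBy]
  | cons y ys ih =>
    intro hp
    rw [List.pairwise_cons] at hp
    obtain ⟨hy, hys⟩ := hp
    by_cases hb : pvBefore l x y = true
    · simp only [PySem.List.insertBy]
      rw [if_pos hb, List.pairwise_cons]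
      refine ⟨?_, List.pairwise_cons.mpr ⟨hy, hys⟩⟩
      intro z hz
      rcases List.mem_cons.mp hz with rfl | hz
      · exact pvBefore_asymm hb
      · exact pvLe_trans (pvBefore_asymm hb) (hy z hz)
    · simp only [PySem.List.insertBy]
      rw [if_neg hb, List.pairwise_cons]
      refine ⟨?_, ih hys⟩
      intro z hz
      rw [PySem.List.mem_insertBy] at hz
      rcases hz with rfl | hz
      · exact pvLe_of_not_before hb
      · exact hy z hz

theorem foldl_insertBy_pairwise {l : String} :
    ∀ (xs : List String) (acc : List String), acc.Pairwise (pvLe l) →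
      (xs.foldl (fun acc x => PySem.List.insertBy (pvBefore l) x acc) acc).Pairwise (pvLe l) := by
  intro xs
  induction xs with
  | nil => intro acc h; exact h
  | cons x xs ih => intro acc h; exact ih _ (insertBy_pairwise h)

theorem alt_pairwise (animal_names : List String) (lineage : String) :
    (sort_animal_groups_py_alt animal_names lineage).Pairwise (pvLe lineage) := by
  have : sort_animal_groups_py_alt animal_names lineage =
      animal_names.foldl (fun acc x => PySem.List.insertBy (pvBefore lineage) x acc) [] := by
    simp only [sort_animal_groups_py_alt, PySem.List.sorted2]
    congr 1
    funext acc x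
    congr 1
    funext a b
    simp [pvBefore]
  rw [this]
  exact foldl_insertBy_pairwise animal_names [] (by simp)

-- The three filter predicates of A's partition.
def pvIsSelf (lineage name : String) : Bool := name == lineage
def pvIsRec (lineage name : String) : Bool :=
  !(name == lineage) && PySem.Str.startswith (PySem.Str.lower name) "rec"
def pvIsOther (lineage name : String) : Bool :=
  !(name == lineage) && !(PySem.Str.startswith (PySem.Str.lower name) "rec")

theorem partition_spec (lineage : String) :
    ∀ (xs : List String) (s r o : List String),
      xs.foldl (fun (st : List String × List String × List String) name =>
        if name == lineage then (st.1 ++ [name], st.2.1, st.2.2)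
        else if PySem.Str.startswith (PySem.Str.lower name) "rec" then (st.1, st.2.1 ++ [name], st.2.2)
        else (st.1, st.2.1, st.2.2 ++ [name])) (s, r, o) =
      (s ++ xs.filter (pvIsSelf lineage), r ++ xs.filter (pvIsRec lineage),
        o ++ xs.filter (pvIsOther lineage)) := by
  intro xs
  induction xs with
  | nil => intro s r o; simp
  | cons x xs ih =>
    intro s r o
    by_cases h1 : (x == lineage) = true
    · simp only [List.foldl_cons, h1, if_true]
      rw [ih]
      simp [pvIsSelf, pvIsRec, pvIsOther, h1]
    · by_cases h2 : PySem.Str.startswith (PySem.Str.lower x) "rec" = true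
      · have h2' := h2; simp at h2'
        simp only [List.foldl_cons, h1, h2, if_true]
        rw [ih]
        simp [pvIsSelf, pvIsRec, pvIsOther, h1, h2']
      · have h2' := h2; simp at h2'
        simp only [List.foldl_cons, h1, h2]
        rw [ih]
        simp [pvIsSelf, pvIsRec, pvIsOther, h1, h2']

theorem filters_perm (lineage : String) :
    ∀ (xs : List String),
      (xs.filter (pvIsSelf lineage) ++ xs.filter (pvIsRec lineage) ++ xs.filter (pvIsOther lineage)).Perm xs := by
  intro xs
  induction xs with
  | nil => simp
  | cons x xs ih =>
    by_cases h1 : (x == lineage) = true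
    · simp only [List.filter_cons, pvIsSelf, pvIsRec, pvIsOther, h1]
      simpa using ih.cons x
    · by_cases h2 : PySem.Str.startswith (PySem.Str.lower x) "rec" = true
      · have h2' := h2; simp at h2'
        have hS : pvIsSelf lineage x = false := by simp [pvIsSelf, h1]
        have hR : pvIsRec lineage x = true := by simp [pvIsRec, h1, h2']
        have hO : pvIsOther lineage x = false := by simp [pvIsOther, h2']
        simp only [List.filter_cons, hS, hR, hO, Bool.false_eq_true, if_false, if_true]
        refine List.Perm.trans ?_ (ih.cons x)
        simp only [List.append_assoc, List.cons_append]
        exact List.perm_middle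
      · have h2' := h2; simp at h2'
        have hS : pvIsSelf lineage x = false := by simp [pvIsSelf, h1]
        have hR : pvIsRec lineage x = false := by simp [pvIsRec, h2']
        have hO : pvIsOther lineage x = true := by simp [pvIsOther, h1, h2']
        simp only [List.filter_cons, hS, hR, hO, Bool.false_eq_true, if_false, if_true]
        refine List.Perm.trans ?_ (ih.cons x)
        simp only [List.append_assoc]
        exact (List.Perm.append_left _ List.perm_middle).trans List.perm_middle

-- ranks of the buckets
theorem rank_self {l x : String} (h : pvIsSelf l x = true) : pvRank l x = 0 := by
  simp only [pvIsSelf] at h; simp [pvRank, h]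
theorem rank_rec {l x : String} (h : pvIsRec l x = true) : pvRank l x = 1 := by
  simp only [pvIsRec, Bool.and_eq_true, Bool.not_eq_true'] at h
  have h2 := h.2
  simp at h2
  simp [pvRank, h.1, h2]
theorem rank_other {l x : String} (h : pvIsOther l x = true) : pvRank l x = 2 := by
  simp only [pvIsOther, Bool.and_eq_true, Bool.not_eq_true'] at h
  have h2 := h.2
  simp at h2
  simp [pvRank, h.1, h2]

theorem pvLe_refl {l a : String} : pvLe l a a := by
  rw [pvLe_iff]; exact ⟨le_refl _, fun _ => le_refl _⟩

-- a block whose elements are all the lineage name is pvLe-pairwise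
theorem pairwise_pvLe_of_all_eq {l : String} :
    ∀ {xs : List String}, (∀ x ∈ xs, x = l) → xs.Pairwise (pvLe l) := by
  intro xs
  induction xs with
  | nil => intro _; exact List.Pairwise.nil
  | cons y ys ih =>
    intro h
    rw [List.pairwise_cons]
    refine ⟨fun z hz => ?_, ih (fun x hx => h x (List.mem_cons_of_mem _ hx))⟩
    rw [h y List.mem_cons_self, h z (List.mem_cons_of_mem _ hz)]
    exact pvLe_refl

-- a same-rank block that is ≤-sorted is pvLe-pairwise
theorem pairwise_of_rank_const {l : String} {k : Int} {xs : List String}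
    (hrk : ∀ x ∈ xs, pvRank l x = k) (hs : xs.Pairwise (· ≤ ·)) : xs.Pairwise (pvLe l) := by
  refine hs.imp_of_mem ?_
  intro a b ha hb hab
  exact pvLe_of_rank_eq_le ((hrk a ha).trans (hrk b hb).symm) hab

theorem a_eq_blocks (animal_names : List String) (lineage : String) :
    sort_animal_groups_py animal_names lineage =
      animal_names.filter (pvIsSelf lineage) ++
      PySem.List.sorted (animal_names.filter (pvIsRec lineage)) (fun x => x) false ++
      PySem.List.sorted (animal_names.filter (pvIsOther lineage)) (fun x => x) false := by
  unfold sort_animal_groups_py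
  rw [partition_spec lineage animal_names [] [] []]
  simp

theorem a_pairwise (animal_names : List String) (lineage : String) :
    (sort_animal_groups_py animal_names lineage).Pairwise (pvLe lineage) := by
  rw [a_eq_blocks]
  rw [List.pairwise_append, List.pairwise_append]
  have hself : ∀ x ∈ animal_names.filter (pvIsSelf lineage), pvRank lineage x = 0 :=
    fun x hx => rank_self (List.of_mem_filter hx)
  have hrec : ∀ x ∈ PySem.List.sorted (animal_names.filter (pvIsRec lineage)) (fun x => x) false,
      pvRank lineage x = 1 := by
    intro x hx
    rw [PySem.List.mem_sorted] at hx
    exact rank_rec (List.of_mem_filter hx)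
  have hoth : ∀ x ∈ PySem.List.sorted (animal_names.filter (pvIsOther lineage)) (fun x => x) false,
      pvRank lineage x = 2 := by
    intro x hx
    rw [PySem.List.mem_sorted] at hx
    exact rank_other (List.of_mem_filter hx)
  refine ⟨⟨?_, ?_, ?_⟩, ?_, ?_⟩
  · -- self block: all elements equal lineage
    exact pairwise_pvLe_of_all_eq
      (fun x hx => by simpa [pvIsSelf] using List.of_mem_filter hx)
  · exact pairwise_of_rank_const hrec
      (by simpa using PySem.List.sorted_pairwise (animal_names.filter (pvIsRec lineage)) (fun x => x))
  · intro a ha b hb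
    exact pvLe_of_rank_lt (by rw [hself a ha, hrec b hb]; norm_num)
  · exact pairwise_of_rank_const hoth
      (by simpa using PySem.List.sorted_pairwise (animal_names.filter (pvIsOther lineage)) (fun x => x))
  · intro a ha b hb
    rcases List.mem_append.mp ha with ha | ha
    · exact pvLe_of_rank_lt (by rw [hself a ha, hoth b hb]; norm_num)
    · exact pvLe_of_rank_lt (by rw [hrec a ha, hoth b hb]; norm_num)

theorem a_perm (animal_names : List String) (lineage : String) :
    (sort_animal_groups_py animal_names lineage).Perm animal_names := by
  rw [a_eq_blocks]
  refine List.Perm.trans ?_ (filters_perm lineage animal_names)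
  exact List.Perm.append (List.Perm.append (List.Perm.refl _)
    (PySem.List.sorted_perm _ _ _)) (PySem.List.sorted_perm _ _ _)

-- ===== VERDICT (by name: the statement is the Claim_ definition above) =====
theorem sort_animal_groups_py_spec : Claim_equal_sort_animal_groups_py := by
  intro animal_names lineage _
  unfold Spec_sort_animal_groups_py
  refine List.Perm.eq_of_pairwise ?_ (a_pairwise animal_names lineage)
    (alt_pairwise animal_names lineage) ?_
  · intro a b _ _ h1 h2; exact pvLe_antisymm h1 h2
  · exact (a_perm animal_names lineage).trans
      (PySem.List.sorted2_perm animal_names (pvRank lineage) (fun n => n) false).symm
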